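-- pv_equiv track=rewrite | github.com/hugodecasta/representron | episod_lib.py | get_all_episod_occurance
-- ===== SOURCE A (Python) =====
-- def find_all(episod, sequence, only_one=False):
--     indexes = []
--     ft_index = -1
--     ep_index = 0
--     ep_len = 0
--     for index in range(len(sequence)):
--         sym = sequence[index]
--         if sym == episod[ep_index]:
--             if ft_index == -1:
--                 ft_index = index
--             ep_len += 1
--             ep_index += 1
--         if ep_len == len(episod):
--             indexes.append(ft_index)
--             if only_one:
--                 return indexes
--             ft_index = -1
--             ep_index = 0
--             ep_len = 0
--     return indexes
--
-- def get_all_episod_occurance(sequence):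
--     episods = {}
--     for le in range(2,len(sequence)):
--         for i in range(0,len(sequence)-le):
--             episod = tuple(sequence[i:i+le])
--             if not episod in episods:
--                 nb = len(find_all(episod,sequence))
--                 episods[episod] = nb
--     return episods
-- ===== SOURCE B (Python) =====
-- def _match_one(pat, seq):
--     # Consume seq until pat is fully matched as a subsequence; return the
--     # remainder after the last matched symbol, or None if pat never completes.
--     i = 0
--     for j, x in enumerate(seq):
--         if x == pat[i]:
--             i += 1
--             if i == len(pat):
--                 return seq[j + 1:]
--     return None
--
--
-- def _count(pat, seq):
--     # Greedy non-overlapping subsequence occurrence count: match, then resume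
--     # right after the last matched symbol.
--     if not pat:
--         return 0
--     c = 0
--     rest = _match_one(pat, seq)
--     while rest is not None:
--         c += 1
--         rest = _match_one(pat, rest)
--     return c
--
--
-- def get_all_episod_occurance(sequence):
--     episods = {}
--     n = len(sequence)
--     for le in range(2, n):
--         for i in range(n - le):
--             episod = tuple(sequence[i:i + le])
--             if episod not in episods:
--                 episods[episod] = _count(episod, sequence)
--     return episods
-- ===== Notes on version B (the rewrite author's own statement) =====
-- stated objective: alternative
-- what changed: A counts occurrences by running an index-driven state machine (ft_index/ep_index/ep_len) over the whole sequence that collects the list of match start indexes and then takes its length; B counts directly by a match-and-resume decomposition: a helper matches the pattern once as a subsequence and returns the suffix after the last matched symbol, and the counter iterates that helper until it fails.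
import Mathlib
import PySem

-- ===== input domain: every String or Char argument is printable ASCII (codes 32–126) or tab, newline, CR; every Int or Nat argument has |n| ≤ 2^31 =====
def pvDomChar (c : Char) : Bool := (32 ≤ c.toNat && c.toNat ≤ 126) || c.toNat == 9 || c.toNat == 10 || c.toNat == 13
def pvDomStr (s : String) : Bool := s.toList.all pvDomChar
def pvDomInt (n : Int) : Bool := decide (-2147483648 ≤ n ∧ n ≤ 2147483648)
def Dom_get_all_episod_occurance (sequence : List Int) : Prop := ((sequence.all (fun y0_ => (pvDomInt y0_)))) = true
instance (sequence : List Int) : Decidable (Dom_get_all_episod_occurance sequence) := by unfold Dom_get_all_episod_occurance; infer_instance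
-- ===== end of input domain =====

-- B replaces A's index/state-machine scan (which builds the list of match start
-- indexes and takes its length) by a direct count: repeatedly match the pattern
-- as a subsequence and recurse on the suffix after the last matched symbol.
-- Objective: alternative decomposition (same asymptotic cost).

-- ===== PORT A =====
-- one iteration of find_all's "for index in range(len(sequence))" loop;
-- state = (early-return value, indexes, ft_index, ep_index, ep_len)
def find_all_step (episod : List Int) (only_one : Bool)
    (st : Option (List Int) × List Int × Int × Int × Int) (ix : Int × Int) :
    Option (List Int) × List Int × Int × Int × Int :=
  match st with
  | (some r, indexes, ft, epi, epl) => (some r, indexes, ft, epi, epl)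
  | (none, indexes, ft, epi, epl) =>
    let index := ix.1
    let sym := ix.2
    -- episod[ep_index]; in every call from get_all_episod_occurance ep_index is
    -- in range (episod is nonempty and ep_index < len(episod) throughout), so
    -- the default 0 of pyGetD is never used and this is exact there
    let st' :=
      if sym = PySem.List.pyGetD episod epi 0 then
        (indexes, (if ft = -1 then index else ft), epi + 1, epl + 1)
      else (indexes, ft, epi, epl)
    if st'.2.2.2 = (episod.length : Int) then
      if only_one then (some (st'.1 ++ [st'.2.1]), st'.1 ++ [st'.2.1], st'.2.1, st'.2.2.1, st'.2.2.2)
      else (none, st'.1 ++ [st'.2.1], -1, 0, 0)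
    else (none, st'.1, st'.2.1, st'.2.2.1, st'.2.2.2)

def find_all (episod : List Int) (sequence : List Int) (only_one : Bool) : List Int :=
  let st := (PySem.List.enumerate sequence 0).foldl (find_all_step episod only_one)
              (none, [], -1, 0, 0)
  match st.1 with
  | some r => r
  | none => st.2.1

def get_all_episod_occurance (sequence : List Int) : List (List Int × Int) :=
  let n : Int := sequence.length
  ((PySem.List.pyRange 2 n 1).foldl (fun episods le =>
    (PySem.List.pyRange 0 (n - le) 1).foldl (fun episods i =>
      let episod := PySem.List.slice sequence (some i) (some (i + le))
      if episods.contains episod then episods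
      else episods.insert episod ((find_all episod sequence false).length : Int))
      episods)
    PySem.Dict.empty).items

-- ===== PORT B =====
-- _match_one: consume seq until pat is matched as a subsequence; return the
-- remainder after the last matched symbol (none = no full match)
def matchOne : List Int → List Int → Option (List Int)
  | [], xs => some xs
  | _ :: _, [] => none
  | p :: ps, x :: xs => if x = p then matchOne ps xs else matchOne (p :: ps) xs

lemma matchOne_some_le : ∀ (pat xs rest : List Int),
    matchOne pat xs = some rest → rest.length ≤ xs.length := by
  intro pat xs
  induction xs generalizing pat with
  | nil =>
    intro rest h
    cases pat with
    | nil => rw [matchOne] at h; cases h; exact le_refl _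
    | cons p ps => rw [matchOne] at h; cases h
  | cons x xs ih =>
    intro rest h
    cases pat with
    | nil => rw [matchOne] at h; cases h; exact le_refl _
    | cons p ps =>
      rw [matchOne] at h
      by_cases hx : x = p
      · rw [if_pos hx] at h
        exact le_trans (ih ps rest h) (Nat.le_succ _)
      · rw [if_neg hx] at h
        exact le_trans (ih (p :: ps) rest h) (Nat.le_succ _)

lemma matchOne_some_lt (p : Int) (ps xs rest : List Int)
    (h : matchOne (p :: ps) xs = some rest) : rest.length < xs.length := by
  cases xs with
  | nil => rw [matchOne] at h; cases h
  | cons x t =>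
    rw [matchOne] at h
    by_cases hx : x = p
    · rw [if_pos hx] at h
      exact Nat.lt_succ_of_le (matchOne_some_le ps t rest h)
    · rw [if_neg hx] at h
      exact Nat.lt_succ_of_le (matchOne_some_le (p :: ps) t rest h)

-- _count: greedy non-overlapping subsequence occurrence count
def countGreedy (pat : List Int) (seq : List Int) : Int :=
  if hp : pat = [] then 0 else
  match h : matchOne pat seq with
  | none => 0
  | some rest => 1 + countGreedy pat rest
termination_by seq.length
decreasing_by
  cases pat with
  | nil => exact absurd rfl hp
  | cons p ps => exact matchOne_some_lt p ps seq rest h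

def get_all_episod_occurance_alt (sequence : List Int) : List (List Int × Int) :=
  let n : Int := sequence.length
  ((PySem.List.pyRange 2 n 1).foldl (fun episods le =>
    (PySem.List.pyRange 0 (n - le) 1).foldl (fun episods i =>
      let episod := PySem.List.slice sequence (some i) (some (i + le))
      if episods.contains episod then episods
      else episods.insert episod (countGreedy episod sequence))
      episods)
    PySem.Dict.empty).items

-- ===== PRECONDITION & SPEC =====
def Spec_get_all_episod_occurance (sequence : List Int) (out : List (List Int × Int)) : Prop := out = get_all_episod_occurance_alt sequence
instance (sequence : List Int) (out : List (List Int × Int)) : Decidable (Spec_get_all_episod_occurance sequence out) := by unfold Spec_get_all_episod_occurance; infer_instance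

-- ===== CLAIM (what is proved, stated in full; the proofs are below) =====
def Claim_equal_get_all_episod_occurance : Prop := ∀ (sequence : List Int), Dom_get_all_episod_occurance sequence → Spec_get_all_episod_occurance sequence (get_all_episod_occurance sequence)

-- ===== LEMMAS AND PROOFS =====

-- "finish the current partial match (remaining pattern rem), then keep
-- counting full pattern pat greedily"
def contC (pat rem xs : List Int) : Int :=
  match matchOne rem xs with
  | none => 0
  | some rest => 1 + countGreedy pat rest

lemma countGreedy_eq_contC (pat seq : List Int) (hp : pat ≠ []) :
    countGreedy pat seq = contC pat pat seq := by
  rw [countGreedy, dif_neg hp]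
  cases hmm : matchOne pat seq <;> simp [contC, hmm]

lemma findAll_loop (pat : List Int) (hp : pat ≠ []) :
    ∀ (ixs : List (Int × Int)) (inds : List Int) (ft : Int) (m : ℕ), m < pat.length →
    ∃ (inds' : List Int) (ft' : Int) (m' : ℕ), m' < pat.length ∧
      ixs.foldl (find_all_step pat false) (none, inds, ft, (m : Int), (m : Int))
        = (none, inds', ft', (m' : Int), (m' : Int)) ∧
      (inds'.length : Int) = inds.length + contC pat (pat.drop m) (ixs.map Prod.snd) := by
  intro ixs
  induction ixs with
  | nil =>
    intro inds ft m hm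
    refine ⟨inds, ft, m, hm, rfl, ?_⟩
    have hdrop : pat.drop m ≠ [] := by
      simp only [ne_eq, List.drop_eq_nil_iff]; omega
    cases hd : pat.drop m with
    | nil => exact absurd hd hdrop
    | cons q qs => simp [contC, matchOne]
  | cons ix ixs ih =>
    intro inds ft m hm
    have hget : PySem.List.pyGetD pat (m : Int) 0 = pat[m] := by
      rw [PySem.List.pyGetD_natCast]; exact List.getD_eq_getElem pat 0 hm
    have hdrop : pat.drop m = pat[m] :: pat.drop (m + 1) := List.drop_eq_getElem_cons hm
    rw [List.foldl_cons]
    by_cases hx : ix.2 = pat[m]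
    · by_cases hfin : m + 1 = pat.length
      · -- full match completes at this element: state resets
        have hc : (m : Int) + 1 = (pat.length : Int) := by omega
        have hstep : find_all_step pat false (none, inds, ft, (m : Int), (m : Int)) ix
            = (none, inds ++ [if ft = -1 then ix.1 else ft], -1, 0, 0) := by
          simp [find_all_step, hget, hx, hc]
        rw [hstep]
        have h0 : ((-1 : Int), (0 : Int), (0 : Int)) = ((-1 : Int), ((0 : ℕ) : Int), ((0 : ℕ) : Int)) := by
          norm_num
        obtain ⟨inds', ft', m', hm', heq, hlen⟩ :=
          ih (inds ++ [if ft = -1 then ix.1 else ft]) (-1) 0 (by omega)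
        refine ⟨inds', ft', m', hm', ?_, ?_⟩
        · rw [h0]; exact heq
        · have hdropfin : pat.drop (m + 1) = [] := by
            simp only [List.drop_eq_nil_iff]; omega
          have hcontC : contC pat (pat.drop m) ((ix :: ixs).map Prod.snd)
              = 1 + countGreedy pat (ixs.map Prod.snd) := by
            rw [List.map_cons, contC, hdrop, hdropfin, matchOne, if_pos hx, matchOne]
          rw [List.drop_zero] at hlen
          rw [hcontC, countGreedy_eq_contC pat _ hp, hlen]
          simp only [List.length_append, List.length_cons, List.length_nil]
          push_cast
          omega
      · -- partial match continues
        have hc : (m : Int) + 1 ≠ (pat.length : Int) := by omega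
        have hstep : find_all_step pat false (none, inds, ft, (m : Int), (m : Int)) ix
            = (none, inds, (if ft = -1 then ix.1 else ft), ((m + 1 : ℕ) : Int), ((m + 1 : ℕ) : Int)) := by
          simp [find_all_step, hget, hx, hc]
        rw [hstep]
        obtain ⟨inds', ft', m', hm', heq, hlen⟩ :=
          ih inds (if ft = -1 then ix.1 else ft) (m + 1) (by omega)
        refine ⟨inds', ft', m', hm', heq, ?_⟩
        rw [hlen]
        congr 1
        simp only [contC, List.map_cons]
        rw [hdrop, matchOne, if_pos hx]
    · -- the symbol does not match episod[ep_index]: state unchanged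
      have hc : (m : Int) ≠ (pat.length : Int) := by omega
      have hstep : find_all_step pat false (none, inds, ft, (m : Int), (m : Int)) ix
          = (none, inds, ft, (m : Int), (m : Int)) := by
        simp [find_all_step, hget, hx, hc]
      rw [hstep]
      obtain ⟨inds', ft', m', hm', heq, hlen⟩ := ih inds ft m hm
      refine ⟨inds', ft', m', hm', heq, ?_⟩
      rw [hlen]
      congr 1
      simp only [contC, List.map_cons]
      rw [hdrop, matchOne, if_neg hx]

lemma findAll_length (pat seq : List Int) (hp : pat ≠ []) :
    ((find_all pat seq false).length : Int) = countGreedy pat seq := by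
  obtain ⟨inds', ft', m', hm', heq, hlen⟩ :=
    findAll_loop pat hp (PySem.List.enumerate seq 0) [] (-1) 0 (by
      cases pat with
      | nil => exact absurd rfl hp
      | cons p ps => simp)
  rw [find_all]
  simp only [Nat.cast_zero] at heq
  rw [heq]
  simp only [List.drop_zero, PySem.List.map_snd_enumerate, List.length_nil, Nat.cast_zero,
    zero_add] at hlen
  rw [hlen, countGreedy_eq_contC pat seq hp]

-- ===== VERDICT (by name: the statement is the Claim_ definition above) =====
theorem get_all_episod_occurance_spec : Claim_equal_get_all_episod_occurance := by
  intro seq _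
  unfold Spec_get_all_episod_occurance get_all_episod_occurance get_all_episod_occurance_alt
  dsimp only
  congr 1
  apply PySem.List.foldl_congr_mem
  intro d le hle
  apply PySem.List.foldl_congr_mem
  intro d' i hi
  have hle' := (PySem.List.mem_pyRange_one).1 hle
  have hi' := (PySem.List.mem_pyRange_one).1 hi
  have hne : PySem.List.slice seq (some i) (some (i + le)) ≠ [] := by
    rw [PySem.List.slice_toNat seq (by omega) (by omega)]
    apply List.ne_nil_of_length_pos
    simp only [List.length_take, List.length_drop]
    omega
  rw [findAll_length _ seq hne]
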